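-- pv_equiv track=rewrite | github.com/ddccffq/gomoku | gomoku/ai/hard_ai.py | _evaluate_direction
-- ===== SOURCE A (Python) =====
-- def _evaluate_direction(board, row, col, directions, player_id):
--     """
--     评估一个位置在所有方向上的分数
--
--     Args:
--         board: 棋盘状态
--         row, col: 位置坐标
--         directions: 方向列表，如 [(1,0), (0,1), (1,1), (1,-1)]
--         player_id: 玩家编号
--
--     Returns:
--         所有方向上的综合评分
--     """
--     board_size = len(board)
--     total_score = 0
--
--     for dx, dy in directions:
--         # 左右或上下方向的连子数和空位数
--         consecutive = 1  # 当前位置算1个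
--         space_before = 0
--         space_after = 0
--
--         # 向一个方向查找连子
--         for sign in [-1, 1]:
--             for step in range(1, 5):  # 最多看4步
--                 x, y = row + sign * dx * step, col + sign * dy * step
--
--                 # 检查边界
--                 if not (0 <= x < board_size and 0 <= y < board_size):
--                     break
--
--                 # 计算连子和空位
--                 if board[x][y] == player_id:
--                     if step == 1 and sign == -1:
--                         consecutive += 1
--                     elif space_before == 0 and sign == -1:
--                         consecutive += 1
--                     elif space_after == 0 and sign == 1:
--                         consecutive += 1
--                     else:
--                         break
--                 elif board[x][y] == 0:
--                     if sign == -1: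
--                         space_before += 1
--                     else:
--                         space_after += 1
--                 else:
--                     break
--
--                 # 如果超过一个空位就停止
--                 if (sign == -1 and space_before > 1) or (sign == 1 and space_after > 1):
--                     break
--
--         # 计算这个方向的分数
--         direction_score = 0
--
--         # 基于连子数和空位数评分
--         if consecutive >= 5:
--             direction_score = 100000  # 五连胜利
--         elif consecutive == 4:
--             if space_before > 0 and space_after > 0:
--                 direction_score = 10000  # 活四
--             elif space_before > 0 or space_after > 0:
--                 direction_score = 1000   # 冲四
--         elif consecutive == 3:
--             if space_before > 0 and space_after > 0:
--                 direction_score = 500    # 活三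
--             elif space_before > 0 or space_after > 0:
--                 direction_score = 100    # 眠三
--         elif consecutive == 2:
--             if space_before > 0 and space_after > 0:
--                 direction_score = 50     # 活二
--             elif space_before > 0 or space_after > 0:
--                 direction_score = 10     # 眠二
--         else:
--             direction_score = 1          # 单子
--
--         total_score += direction_score
--
--     return total_score
-- ===== SOURCE B (Python) =====
-- def _window(board, n, row, col, sx, sy):
--     """Cells at steps 1..4 from (row, col) along (sx, sy), stopping at the edge."""
--     cells = []
--     for k in range(1, 5):
--         x, y = row + sx * k, col + sy * k
--         if not (0 <= x < n and 0 <= y < n):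
--             break
--         cells.append(board[x][y])
--     return cells
--
--
-- def _side(cells, player_id):
--     """Leading run of own stones, and whether the cell right after the run is empty."""
--     i = 0
--     while i < len(cells) and cells[i] == player_id:
--         i += 1
--     return i, i < len(cells) and cells[i] == 0
--
--
-- _OPEN2 = {2: 50, 3: 500, 4: 10000}
-- _OPEN1 = {2: 10, 3: 100, 4: 1000}
--
--
-- def _score(run, open_l, open_r):
--     if run >= 5:
--         return 100000
--     if open_l and open_r:
--         return _OPEN2.get(run, 1)
--     if open_l or open_r:
--         return _OPEN1.get(run, 1)
--     return 1 if run < 2 else 0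
--
--
-- def _evaluate_direction(board, row, col, directions, player_id):
--     n = len(board)
--     total = 0
--     for dx, dy in directions:
--         ls, open_l = _side(_window(board, n, row, col, -dx, -dy), player_id)
--         rs, open_r = _side(_window(board, n, row, col, dx, dy), player_id)
--         total += _score(1 + ls + rs, open_l, open_r)
--     return total
-- ===== Notes on version B (the rewrite author's own statement) =====
-- stated objective: alternative
-- what changed: Instead of A's stateful sign-loop with gap counters and post-increment break conditions, B first materializes the up-to-4-cell in-bounds window on each side and then reads the answer off it: the run is the length of the leading own-stone prefix and openness is just 'the single cell after that prefix is empty' (gap counting disappears entirely); the score cascade becomes two small dict lookups.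
-- outside the precondition, e.g. on _evaluate_direction([[2, 0, 0], [0, 2, 0], [0, 0]], 0, 0, [(1, 1)], 1): A returns 1, B raises IndexError
import Mathlib
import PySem

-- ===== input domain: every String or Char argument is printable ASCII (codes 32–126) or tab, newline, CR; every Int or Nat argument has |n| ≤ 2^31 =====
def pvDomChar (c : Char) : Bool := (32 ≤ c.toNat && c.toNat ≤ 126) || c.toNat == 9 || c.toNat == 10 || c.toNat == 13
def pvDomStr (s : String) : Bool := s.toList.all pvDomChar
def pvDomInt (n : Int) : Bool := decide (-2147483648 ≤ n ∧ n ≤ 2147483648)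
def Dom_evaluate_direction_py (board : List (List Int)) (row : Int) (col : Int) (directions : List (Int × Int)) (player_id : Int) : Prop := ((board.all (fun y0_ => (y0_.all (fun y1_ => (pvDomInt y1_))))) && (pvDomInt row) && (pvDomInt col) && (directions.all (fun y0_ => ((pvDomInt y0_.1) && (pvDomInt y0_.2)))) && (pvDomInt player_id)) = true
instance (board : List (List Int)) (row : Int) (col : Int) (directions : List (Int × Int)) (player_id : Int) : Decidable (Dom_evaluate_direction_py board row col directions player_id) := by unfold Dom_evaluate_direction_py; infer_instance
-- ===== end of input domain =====

-- B replaces A's stateful sign-loop (gap counters, post-increment breaks) by materializing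
-- the in-bounds window of at most 4 cells per side and reading run length / openness off it
-- (objective: alternative; same asymptotic cost).


-- board[x][y], as both Pythons read it (accessed only under 0 ≤ x,y < len(board);
-- Pre_ guarantees the probed cells exist, so the defaults are never reached inside Pre_)
def pyCell (board : List (List Int)) (x y : Int) : Int :=
  (PySem.List.pyGet? ((PySem.List.pyGet? board x).getD []) y).getD 0

-- ===== PORT A =====

-- the inner 'for step in range(1,5)' loop of A for one sign, over the remaining steps;
-- state is (consecutive, space_before, space_after); 'break' returns the state.
def loopA (board : List (List Int)) (n row col dx dy sign player : Int) :
    List Int → Int × Int × Int → Int × Int × Int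
  | [], st => st
  | step :: rest, (consec, sb, sa) =>
    let x := row + sign * dx * step
    let y := col + sign * dy * step
    if ¬ (0 ≤ x ∧ x < n ∧ 0 ≤ y ∧ y < n) then (consec, sb, sa)
    else if pyCell board x y = player then
      if step = 1 ∧ sign = -1 then
        if (sign = -1 ∧ sb > 1) ∨ (sign = 1 ∧ sa > 1) then (consec + 1, sb, sa)
        else loopA board n row col dx dy sign player rest (consec + 1, sb, sa)
      else if sb = 0 ∧ sign = -1 then
        if (sign = -1 ∧ sb > 1) ∨ (sign = 1 ∧ sa > 1) then (consec + 1, sb, sa)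
        else loopA board n row col dx dy sign player rest (consec + 1, sb, sa)
      else if sa = 0 ∧ sign = 1 then
        if (sign = -1 ∧ sb > 1) ∨ (sign = 1 ∧ sa > 1) then (consec + 1, sb, sa)
        else loopA board n row col dx dy sign player rest (consec + 1, sb, sa)
      else (consec, sb, sa)
    else if pyCell board x y = 0 then
      let sb' := if sign = -1 then sb + 1 else sb
      let sa' := if sign = 1 then sa + 1 else sa
      if (sign = -1 ∧ sb' > 1) ∨ (sign = 1 ∧ sa' > 1) then (consec, sb', sa')
      else loopA board n row col dx dy sign player rest (consec, sb', sa')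
    else (consec, sb, sa)

-- the final if/elif score cascade of A
def cascadeA (consec sb sa : Int) : Int :=
  if consec ≥ 5 then 100000
  else if consec = 4 then
    (if sb > 0 ∧ sa > 0 then 10000 else if sb > 0 ∨ sa > 0 then 1000 else 0)
  else if consec = 3 then
    (if sb > 0 ∧ sa > 0 then 500 else if sb > 0 ∨ sa > 0 then 100 else 0)
  else if consec = 2 then
    (if sb > 0 ∧ sa > 0 then 50 else if sb > 0 ∨ sa > 0 then 10 else 0)
  else 1

def evaluate_direction_py (board : List (List Int)) (row : Int) (col : Int) (directions : List (Int × Int)) (player_id : Int) : Int :=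
  let board_size : Int := (board.length : Int)
  directions.foldl (fun total d =>
    let st := [(-1 : Int), 1].foldl
      (fun st sign =>
        loopA board board_size row col d.1 d.2 sign player_id (PySem.List.pyRange 1 5 1) st)
      (1, 0, 0)
    total + cascadeA st.1 st.2.1 st.2.2) 0

-- ===== PORT B =====

-- Source B's _window: the cells at steps 1..4 along (sx,sy), stopping at the edge
def windowB (board : List (List Int)) (n row col sx sy : Int) : List Int → List Int
  | [] => []
  | k :: rest =>
    let x := row + sx * k
    let y := col + sy * k
    if 0 ≤ x ∧ x < n ∧ 0 ≤ y ∧ y < n then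
      pyCell board x y :: windowB board n row col sx sy rest
    else []

-- Source B's _side: leading run of own stones, and whether the cell right after it is empty
def sideB (player : Int) : List Int → Int × Bool
  | [] => (0, false)
  | c :: rest =>
    if c = player then
      let s := sideB player rest
      (s.1 + 1, s.2)
    else (0, decide (c = 0))

-- Source B's _score; the two 3-key dict literals' .get(run, 1) is ported by hand as an
-- if-chain over the keys 2, 3, 4 (exact: matching key, else the default 1)
def scoreB (run : Int) (openL openR : Bool) : Int :=
  if run ≥ 5 then 100000
  else if openL && openR then
    (if run = 2 then 50 else if run = 3 then 500 else if run = 4 then 10000 else 1)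
  else if openL || openR then
    (if run = 2 then 10 else if run = 3 then 100 else if run = 4 then 1000 else 1)
  else if run < 2 then 1 else 0

def evaluate_direction_py_alt (board : List (List Int)) (row : Int) (col : Int) (directions : List (Int × Int)) (player_id : Int) : Int :=
  let n : Int := (board.length : Int)
  directions.foldl (fun total d =>
    let L := sideB player_id (windowB board n row col (-d.1) (-d.2) (PySem.List.pyRange 1 5 1))
    let R := sideB player_id (windowB board n row col d.1 d.2 (PySem.List.pyRange 1 5 1))
    total + scoreB (1 + L.1 + R.1) L.2 R.2) 0

-- ===== PRECONDITION & SPEC =====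
-- Pre_ excludes ragged boards with a missing cell within 4 in-bounds steps of (row,col)
-- along some ±direction: Python A raises IndexError when it actually probes such a cell
-- (it can still return when a break stops its walk first — see cites; B materializes the
-- whole window up front, so B itself raises IndexError on those excluded inputs).
def Pre_evaluate_direction_py (board : List (List Int)) (row : Int) (col : Int) (directions : List (Int × Int)) (player_id : Int) : Prop :=
  ∀ d ∈ directions, ∀ k ∈ ([1, 2, 3, 4] : List Int), ∀ s ∈ ([-1, 1] : List Int),
    (0 ≤ row + s * d.1 * k ∧ row + s * d.1 * k < (board.length : Int) ∧
     0 ≤ col + s * d.2 * k ∧ col + s * d.2 * k < (board.length : Int)) →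
    col + s * d.2 * k < (((PySem.List.pyGet? board (row + s * d.1 * k)).getD []).length : Int)

instance (board : List (List Int)) (row : Int) (col : Int) (directions : List (Int × Int)) (player_id : Int) : Decidable (Pre_evaluate_direction_py board row col directions player_id) := by unfold Pre_evaluate_direction_py; infer_instance

def pvWitness_evaluate_direction_py : List (List Int) × Int × Int × (List (Int × Int)) × Int :=
  ([[0, 1, 0], [0, 1, 0], [0, 2, 0]], 1, 1, [(1, 0), (0, 1), (1, 1), (1, -1)], 1)

def Spec_evaluate_direction_py (board : List (List Int)) (row : Int) (col : Int) (directions : List (Int × Int)) (player_id : Int) (out : Int) : Prop := out = evaluate_direction_py_alt board row col directions player_id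
instance (board : List (List Int)) (row : Int) (col : Int) (directions : List (Int × Int)) (player_id : Int) (out : Int) : Decidable (Spec_evaluate_direction_py board row col directions player_id out) := by unfold Spec_evaluate_direction_py; infer_instance

-- ===== CLAIM (what is proved, stated in full; the proofs are below) =====
def Claim_equal_evaluate_direction_py : Prop := ∀ (board : List (List Int)) (row : Int) (col : Int) (directions : List (Int × Int)) (player_id : Int), Dom_evaluate_direction_py board row col directions player_id → Pre_evaluate_direction_py board row col directions player_id → Spec_evaluate_direction_py board row col directions player_id (evaluate_direction_py board row col directions player_id)

-- ===== LEMMAS AND PROOFS =====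

-- componentwise equality of the (consec, space_before, space_after) state triples
lemma triple_eq {a b c a' b' c' : Int} (h1 : a = a') (h2 : b = b') (h3 : c = c') :
    ((a, b, c) : Int × Int × Int) = (a', b', c') := by subst h1 h2 h3; rfl

-- branch helpers: one step of A against one cons-cell of B's window
lemma brN_player (L : Int × Int × Int) (cell player c spP s : Int) (t : Bool) (e : Int × Bool)
    (hc : cell = player) (hL : L = (c + 1 + s, spP, 0)) (ht : decide (0 < spP) = t) :
    ∃ sp, L = (c + (if cell = player then (s + 1, t) else e).1, sp, 0) ∧
          decide (0 < sp) = (if cell = player then (s + 1, t) else e).2 := by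
  subst hL; rw [if_pos hc]
  exact ⟨spP, triple_eq (by omega) rfl rfl, ht⟩

lemma brN_gap (L : Int × Int × Int) (cell player c spG : Int) (p : Int × Bool)
    (hc : ¬ cell = player) (h0 : cell = 0) (hL : L = (c, spG, 0)) (hG : 0 < spG) :
    ∃ sp, L = (c + (if cell = player then p else (0, decide (cell = 0))).1, sp, 0) ∧
          decide (0 < sp) = (if cell = player then p else (0, decide (cell = 0))).2 := by
  subst hL; rw [if_neg hc]
  exact ⟨spG, triple_eq (by simp) rfl rfl, by simp [h0, hG]⟩

lemma brN_opp (cell player c : Int) (p : Int × Bool)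
    (hc : ¬ cell = player) (h0 : ¬ cell = 0) :
    ∃ sp, ((c, 0, 0) : Int × Int × Int) =
            (c + (if cell = player then p else (0, decide (cell = 0))).1, sp, 0) ∧
          decide (0 < sp) = (if cell = player then p else (0, decide (cell = 0))).2 := by
  rw [if_neg hc]
  exact ⟨0, triple_eq (by simp) rfl rfl, by simp [h0]⟩

lemma brP_player (L : Int × Int × Int) (cell player c sb spP s : Int) (t : Bool) (e : Int × Bool)
    (hc : cell = player) (hL : L = (c + 1 + s, sb, spP)) (ht : decide (0 < spP) = t) :
    ∃ sp, L = (c + (if cell = player then (s + 1, t) else e).1, sb, sp) ∧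
          decide (0 < sp) = (if cell = player then (s + 1, t) else e).2 := by
  subst hL; rw [if_pos hc]
  exact ⟨spP, triple_eq (by omega) rfl rfl, ht⟩

lemma brP_gap (L : Int × Int × Int) (cell player c sb spG : Int) (p : Int × Bool)
    (hc : ¬ cell = player) (h0 : cell = 0) (hL : L = (c, sb, spG)) (hG : 0 < spG) :
    ∃ sp, L = (c + (if cell = player then p else (0, decide (cell = 0))).1, sb, sp) ∧
          decide (0 < sp) = (if cell = player then p else (0, decide (cell = 0))).2 := by
  subst hL; rw [if_neg hc]
  exact ⟨spG, triple_eq (by simp) rfl rfl, by simp [h0, hG]⟩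

lemma brP_opp (cell player c sb : Int) (p : Int × Bool)
    (hc : ¬ cell = player) (h0 : ¬ cell = 0) :
    ∃ sp, ((c, sb, 0) : Int × Int × Int) =
            (c + (if cell = player then p else (0, decide (cell = 0))).1, sb, sp) ∧
          decide (0 < sp) = (if cell = player then p else (0, decide (cell = 0))).2 := by
  rw [if_neg hc]
  exact ⟨0, triple_eq (by simp) rfl rfl, by simp [h0]⟩

-- once A's sign = -1 pass has seen a gap (sb ≥ 1), it counts no more stones and keeps sb > 0
lemma loopA_gap_neg (board : List (List Int)) (n row col dx dy player : Int)
    (steps : List Int) (h : (1 : Int) ∉ steps) (c sb0 : Int) (hsb : 1 ≤ sb0) :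
    ∃ sp, loopA board n row col dx dy (-1) player steps (c, sb0, 0) = (c, sp, 0) ∧ 0 < sp := by
  cases steps with
  | nil => exact ⟨sb0, rfl, by omega⟩
  | cons k rest =>
    have hk : ¬ k = 1 := fun hk1 => h (hk1 ▸ List.mem_cons_self)
    simp only [loopA]
    split_ifs <;> first
      | exact ⟨sb0, rfl, by omega⟩
      | exact ⟨sb0 + 1, rfl, by omega⟩
      | (exfalso; simp_all <;> omega)

-- once A's sign = 1 pass has seen a gap (sa ≥ 1), it counts no more stones and keeps sa > 0
lemma loopA_gap_pos (board : List (List Int)) (n row col dx dy player : Int)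
    (steps : List Int) (c sb sa0 : Int) (hsa : 1 ≤ sa0) :
    ∃ sp, loopA board n row col dx dy 1 player steps (c, sb, sa0) = (c, sb, sp) ∧ 0 < sp := by
  cases steps with
  | nil => exact ⟨sa0, rfl, by omega⟩
  | cons k rest =>
    simp only [loopA]
    split_ifs <;> first
      | exact ⟨sa0, rfl, by omega⟩
      | exact ⟨sa0 + 1, rfl, by omega⟩
      | (exfalso; simp_all <;> omega)

-- A's sign = -1 pass computes exactly the leading-run length and gap flag of B's window
lemma loopA_neg (board : List (List Int)) (n row col dx dy player : Int) :
    ∀ (steps : List Int), (1 : Int) ∉ steps.tail → ∀ c : Int,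
      ∃ sp, loopA board n row col dx dy (-1) player steps (c, 0, 0) =
              (c + (sideB player (windowB board n row col (-dx) (-dy) steps)).1, sp, 0) ∧
            decide (0 < sp) = (sideB player (windowB board n row col (-dx) (-dy) steps)).2 := by
  intro steps
  induction steps with
  | nil =>
    intro _ c
    exact ⟨0, by simp [loopA, windowB, sideB], by simp [sideB, windowB]⟩
  | cons k rest ih =>
    intro h c
    have h' : (1 : Int) ∉ rest := by simpa using h
    have h'' : (1 : Int) ∉ rest.tail := fun hm => h' (List.mem_of_mem_tail hm)
    have hx : row + (-1) * dx * k = row + (-dx) * k := by ring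
    have hy : col + (-1) * dy * k = col + (-dy) * k := by ring
    obtain ⟨spP, heqP, hspP⟩ := ih h'' (c + 1)
    obtain ⟨spG, heqG, hspG⟩ :=
      loopA_gap_neg board n row col dx dy player rest h' c 1 (by omega)
    simp only [loopA, windowB, hx, hy]
    norm_num
    clear hx hy h h' h'' ih
    split_ifs <;>
      first
      | exact brN_player _ _ _ _ _ _ _ _ (by assumption) heqP hspP
      | exact brN_gap _ _ _ _ _ _ (by assumption) (by assumption) heqG hspG
      | exact brN_opp _ _ _ _ (by assumption) (by assumption)
      | (exfalso; omega)
      | (exfalso; push_neg at *; omega)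
      | exact ⟨0, by simp [sideB], by simp [sideB]⟩

-- A's sign = 1 pass computes the leading-run length and gap flag of B's window, keeping sb
lemma loopA_pos (board : List (List Int)) (n row col dx dy player : Int) :
    ∀ (steps : List Int) (c sb : Int),
      ∃ sp, loopA board n row col dx dy 1 player steps (c, sb, 0) =
              (c + (sideB player (windowB board n row col dx dy steps)).1, sb, sp) ∧
            decide (0 < sp) = (sideB player (windowB board n row col dx dy steps)).2 := by
  intro steps
  induction steps with
  | nil =>
    intro c sb
    exact ⟨0, by simp [loopA, windowB, sideB], by simp [sideB, windowB]⟩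
  | cons k rest ih =>
    intro c sb
    have hx : row + 1 * dx * k = row + dx * k := by ring
    have hy : col + 1 * dy * k = col + dy * k := by ring
    obtain ⟨spP, heqP, hspP⟩ := ih (c + 1) sb
    obtain ⟨spG, heqG, hspG⟩ :=
      loopA_gap_pos board n row col dx dy player rest c sb 1 (by omega)
    simp only [loopA, windowB, hx, hy]
    norm_num
    clear hx hy ih
    split_ifs <;>
      first
      | exact brP_player _ _ _ _ _ _ _ _ _ (by assumption) heqP hspP
      | exact brP_gap _ _ _ _ _ _ _ (by assumption) (by assumption) heqG hspG
      | exact brP_opp _ _ _ _ _ (by assumption) (by assumption)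
      | (exfalso; omega)
      | (exfalso; push_neg at *; omega)
      | exact ⟨0, by simp [sideB], by simp [sideB]⟩

-- the score cascade agrees with Source B's _score for every state (openness = gap counter > 0)
lemma cascade_eq_score (c sb sa : Int) :
    cascadeA c sb sa = scoreB c (decide (0 < sb)) (decide (0 < sa)) := by
  unfold cascadeA scoreB
  by_cases hb : 0 < sb <;> by_cases ha : 0 < sa <;>
    simp [hb, ha] <;> split_ifs <;> omega

lemma foldl_fun_congr {α β : Type} (l : List α) (f g : β → α → β) (s : β)
    (h : ∀ s a, f s a = g s a) : l.foldl f s = l.foldl g s := by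
  induction l generalizing s with
  | nil => rfl
  | cons a t ih => simp only [List.foldl]; rw [h]; exact ih _

-- ===== VERDICT (by name: the statement is the Claim_ definition above) =====
theorem evaluate_direction_py_spec : Claim_equal_evaluate_direction_py := by
  intro board row col directions player_id _ _
  unfold Spec_evaluate_direction_py
  unfold evaluate_direction_py evaluate_direction_py_alt
  apply Eq.symm
  apply foldl_fun_congr
  intro total d
  have hsteps : PySem.List.pyRange 1 5 1 = [1, 2, 3, 4] := by decide
  simp only [List.foldl, hsteps]
  obtain ⟨spL, heqL, hspL⟩ :=
    loopA_neg board (board.length : Int) row col d.1 d.2 player_id [1, 2, 3, 4] (by decide) 1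
  rw [heqL]
  obtain ⟨spR, heqR, hspR⟩ :=
    loopA_pos board (board.length : Int) row col d.1 d.2 player_id [1, 2, 3, 4]
      (1 + (sideB player_id (windowB board (board.length : Int) row col (-d.1) (-d.2) [1, 2, 3, 4])).1) spL
  rw [heqR]
  simp only [cascade_eq_score, hspL, hspR]
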